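-- pv_equiv track=rewrite | github.com/Yukun-Huang/Google-KickStart | 2018 Round C/Problem C/python/C.py | solution_better
-- ===== SOURCE A (Python) =====
-- def solution_better(N, K, A):
--     answer = 0
--     mod = 1000000007
--     GP_sum = K
--     for n in range(1, N + 1):
--         answer += (N-n+1)*A[n-1] * GP_sum
--         answer = answer % mod
--         nn = n+1
--         GP_sum += nn*(nn**K-1)//(nn-1)
--         GP_sum = GP_sum % mod
--     return answer
-- ===== SOURCE B (Python) =====
-- def _geom_mod(m, k, mod):
--     # (1 + m + ... + m**(k-1)) % mod via halving; k <= 0 -> 0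
--     if k <= 0:
--         return 0
--     if k % 2 == 1:
--         return (_geom_mod(m, k - 1, mod) + pow(m, k - 1, mod)) % mod
--     h = k // 2
--     return _geom_mod(m, h, mod) * (1 + pow(m, h, mod)) % mod
--
-- def solution_better(N, K, A):
--     mod = 1000000007
--     answer = 0
--     gp = K % mod
--     for n in range(1, N + 1):
--         answer = (answer + (N - n + 1) * A[n - 1] * gp) % mod
--         gp = (gp + (n + 1) * _geom_mod(n + 1, K, mod)) % mod
--     return answer
-- ===== Notes on version B (the rewrite author's own statement) =====
-- stated objective: faster
-- what changed: A grows an exact big integer nn**K and an exact division per loop step; B keeps everything reduced mod 1000000007, computing each step's geometric series (1+m+...+m^(K-1)) mod p by a halving recursion with three-argument pow, avoiding big-integer arithmetic entirely.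
-- outside the precondition, e.g. on solution_better(2, -1, [1, 2]): A returns 1000000001.0, B returns 1000000003
import Mathlib
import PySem

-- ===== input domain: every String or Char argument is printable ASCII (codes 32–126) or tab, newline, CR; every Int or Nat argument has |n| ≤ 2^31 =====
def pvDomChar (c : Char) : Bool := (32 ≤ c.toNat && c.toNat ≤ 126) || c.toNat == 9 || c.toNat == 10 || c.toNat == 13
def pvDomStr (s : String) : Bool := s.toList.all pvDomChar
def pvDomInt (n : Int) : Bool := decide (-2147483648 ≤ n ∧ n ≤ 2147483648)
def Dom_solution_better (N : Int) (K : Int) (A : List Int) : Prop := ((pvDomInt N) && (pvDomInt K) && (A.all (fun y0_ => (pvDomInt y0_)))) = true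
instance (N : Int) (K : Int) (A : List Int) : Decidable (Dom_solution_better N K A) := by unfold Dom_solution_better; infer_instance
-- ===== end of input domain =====

-- B replaces A's per-step big-integer exponentiation nn**K and exact division by a
-- halving geometric-series accumulation mod p (pow with modulus), same return value.

-- ===== PORT A =====
-- one iteration of A's for-loop; state = some (answer, GP_sum), none = IndexError (outside Pre_)
def pystepA (N : Int) (K : Int) (A : List Int) (st : Option (Int × Int)) (n : Int) : Option (Int × Int) :=
  match st with
  | none => none
  | some (answer, gp) =>
    match PySem.List.pyGet? A (n - 1) with
    | none => none
    | some a =>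
      let answer := answer + (N - n + 1) * a * gp
      let answer := PySem.Int.mod answer 1000000007
      let nn := n + 1
      -- nn ** K : exact for K ≥ 0 (Pre_; Python leaves Int for K < 0)
      let gp := gp + nn * PySem.Int.floordiv (nn ^ K.toNat - 1) (nn - 1)
      let gp := PySem.Int.mod gp 1000000007
      some (answer, gp)

def solution_better (N : Int) (K : Int) (A : List Int) : Int :=
  match (PySem.List.pyRange 1 (N + 1) 1).foldl (pystepA N K A) (some (0, K)) with
  | some (answer, _) => answer
  | none => 0  -- unreachable under Pre_ (Python raises IndexError there)

-- ===== PORT B =====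
-- _geom_mod(m, k, md) = (1 + m + ... + m^(k-1)) % md by halving; k taken as K.toNat (k ≤ 0 → 0)
def geomMod (m : Int) (k : Nat) (md : Int) : Int :=
  if k = 0 then 0
  else if k % 2 = 1 then
    PySem.Int.mod (geomMod m (k - 1) md + PySem.Int.powMod m (k - 1) md) md
  else
    PySem.Int.mod (geomMod m (k / 2) md * (1 + PySem.Int.powMod m (k / 2) md)) md
termination_by k
decreasing_by all_goals omega

def pystepB (N : Int) (K : Int) (A : List Int) (st : Option (Int × Int)) (n : Int) : Option (Int × Int) :=
  match st with
  | none => none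
  | some (answer, gp) =>
    match PySem.List.pyGet? A (n - 1) with
    | none => none
    | some a =>
      some (PySem.Int.mod (answer + (N - n + 1) * a * gp) 1000000007,
            PySem.Int.mod (gp + (n + 1) * geomMod (n + 1) K.toNat 1000000007) 1000000007)

def solution_better_alt (N : Int) (K : Int) (A : List Int) : Int :=
  match (PySem.List.pyRange 1 (N + 1) 1).foldl (pystepB N K A) (some (0, PySem.Int.mod K 1000000007)) with
  | some (answer, _) => answer
  | none => 0

-- ===== PRECONDITION & SPEC =====
-- Pre_ excludes K < 0 with N ≥ 2 (there Python's nn**K is a float, so A returns a non-int float)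
-- and N > len(A) (there A raises IndexError); everything else is claimed.
def Pre_solution_better (N : Int) (K : Int) (A : List Int) : Prop :=
  (0 ≤ K ∨ N ≤ 1) ∧ N ≤ (A.length : Int)
instance (N : Int) (K : Int) (A : List Int) : Decidable (Pre_solution_better N K A) := by
  unfold Pre_solution_better; infer_instance

def pvWitness_solution_better : Int × Int × List Int := (2, 3, [5, -7])

def Spec_solution_better (N : Int) (K : Int) (A : List Int) (out : Int) : Prop := out = solution_better_alt N K A
instance (N : Int) (K : Int) (A : List Int) (out : Int) : Decidable (Spec_solution_better N K A out) := by unfold Spec_solution_better; infer_instance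

-- ===== CLAIM (what is proved, stated in full; the proofs are below) =====
def Claim_equal_solution_better : Prop := ∀ (N : Int) (K : Int) (A : List Int), Dom_solution_better N K A → Pre_solution_better N K A → Spec_solution_better N K A (solution_better N K A)

-- ===== LEMMAS AND PROOFS =====

-- a % p is congruent to a mod p (packaging of Int.emod_emod_of_dvd)
lemma modeq_emod (p a : Int) : Int.ModEq p (a % p) a := Int.emod_emod_of_dvd a dvd_rfl

-- B's halving helper computes the geometric sum mod p
lemma geomMod_eq (m : Int) (k : Nat) :
    geomMod m k 1000000007 = (∑ j ∈ Finset.range k, m ^ j) % 1000000007 := by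
  induction k using Nat.strong_induction_on with
  | _ k ih =>
    rw [geomMod]
    split_ifs with h0 h1
    · simp [h0]
    · rw [PySem.Int.mod_eq_emod_of_pos (by norm_num),
        PySem.Int.powMod_eq_emod _ _ (by norm_num),
        ih (k - 1) (by omega)]
      conv_rhs => rw [show k = (k - 1) + 1 by omega, Finset.sum_range_succ]
      exact Int.ModEq.add (modeq_emod _ _) (modeq_emod _ _)
    · rw [PySem.Int.mod_eq_emod_of_pos (by norm_num),
        PySem.Int.powMod_eq_emod _ _ (by norm_num),
        ih (k / 2) (by omega)]
      conv_rhs => rw [show k = k / 2 + k / 2 by omega, Finset.sum_range_add]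
      have : (∑ j ∈ Finset.range (k / 2), m ^ (k / 2 + j))
          = m ^ (k / 2) * ∑ j ∈ Finset.range (k / 2), m ^ j := by
        rw [Finset.mul_sum]; exact Finset.sum_congr rfl (fun j _ => by rw [pow_add])
      rw [this]
      have hx : (∑ j ∈ Finset.range (k / 2), m ^ j) + m ^ (k / 2) * ∑ j ∈ Finset.range (k / 2), m ^ j
          = (∑ j ∈ Finset.range (k / 2), m ^ j) * (1 + m ^ (k / 2)) := by ring
      rw [hx]
      exact Int.ModEq.mul (modeq_emod _ _) (Int.ModEq.add_left 1 (modeq_emod _ _))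

-- A's exact division nn*(nn**K-1)//(nn-1) is the geometric sum
lemma floordiv_geom (nn : Int) (h : 2 ≤ nn) (k : Nat) :
    PySem.Int.floordiv (nn ^ k - 1) (nn - 1) = ∑ j ∈ Finset.range k, nn ^ j := by
  rw [PySem.Int.floordiv_eq_ediv_of_pos (by omega), ← geom_sum_mul nn k,
    Int.mul_ediv_cancel _ (by omega)]

-- loop invariant: equal answers and congruent GP accumulators stay so
lemma loop_eq (N K : Int) (A : List Int) :
    ∀ (L : List Int) (ans gpA gpB : Int),
      (∀ n ∈ L, 1 ≤ n ∧ n ≤ (A.length : Int)) →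
      gpA % 1000000007 = gpB % 1000000007 →
      ∃ a gA gB,
        L.foldl (pystepA N K A) (some (ans, gpA)) = some (a, gA) ∧
        L.foldl (pystepB N K A) (some (ans, gpB)) = some (a, gB) ∧
        gA % 1000000007 = gB % 1000000007 := by
  intro L
  induction L with
  | nil => exact fun ans gpA gpB _ hg => ⟨ans, gpA, gpB, rfl, rfl, hg⟩
  | cons n L ih =>
    intro ans gpA gpB hmem hg
    obtain ⟨hn1, hn2⟩ := hmem n (List.mem_cons_self ..)
    have hget := PySem.List.pyGet?_eq_some_getElem (xs := A) (i := n - 1) (by omega) (by omega)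
    have hS := floordiv_geom (n + 1) (by omega) K.toNat
    have hG := geomMod_eq (n + 1) K.toNat
    simp only [List.foldl_cons, pystepA, pystepB, hget, PySem.Int.mod_eq_emod_of_pos (show (0:Int) < 1000000007 by norm_num)]
    set S := ∑ j ∈ Finset.range K.toNat, (n + 1) ^ j with hSdef
    rw [hS, hG]
    have hans : (ans + (N - n + 1) * A[(n - 1).toNat] * gpA) % 1000000007
        = (ans + (N - n + 1) * A[(n - 1).toNat] * gpB) % 1000000007 :=
      Int.ModEq.add_left ans (Int.ModEq.mul_left _ hg)
    have hgp : (gpA + (n + 1) * S) % 1000000007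
        = (gpB + (n + 1) * (S % 1000000007)) % 1000000007 :=
      Int.ModEq.add hg (Int.ModEq.mul_left _ (Int.emod_emod_of_dvd _ dvd_rfl).symm)
    rw [hans, hgp]
    exact ih _ _ _ (fun x hx => hmem x (List.mem_cons_of_mem _ hx))
      (by rw [Int.emod_emod_of_dvd _ dvd_rfl])

-- ===== VERDICT (by name: the statement is the Claim_ definition above) =====
theorem solution_better_spec : Claim_equal_solution_better := by
  intro N K A _ hpre
  obtain ⟨-, hN⟩ := hpre
  unfold Spec_solution_better solution_better solution_better_alt
  obtain ⟨a, gA, gB, h1, h2, -⟩ :=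
    loop_eq N K A (PySem.List.pyRange 1 (N + 1) 1) 0 K (PySem.Int.mod K 1000000007)
      (fun n hn => by
        have := (PySem.List.mem_pyRange_one).mp hn
        exact ⟨this.1, by omega⟩)
      (by rw [PySem.Int.mod_eq_emod_of_pos (by norm_num), Int.emod_emod_of_dvd _ dvd_rfl])
  rw [h1, h2]
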